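-- pv_equiv track=rewrite | github.com/mawentao007/swift | test/probe/test_replication_servers_working.py | find_max_occupancy_node
-- ===== SOURCE A (Python) =====
-- def find_max_occupancy_node(dir_list):
--     """
--     Find node with maximum occupancy.
--
--     :param list_dir: list of directories for each node.
--     :return number: number node in list_dir
--     """
--     count = 0
--     number = 0
--     length = 0
--     for dirs in dir_list:
--         if length < len(dirs):
--             length = len(dirs)
--             number = count
--         count += 1
--     return number
-- ===== SOURCE B (Python) =====
-- def find_max_occupancy_node(dir_list):
--     lengths = [len(d) for d in dir_list]
--     if not lengths:
--         return 0
--     return lengths.index(max(lengths))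
-- ===== Notes on version B (the rewrite author's own statement) =====
-- stated objective: idiomatic
-- what changed: Replaces A's single fused scan carrying (count, number, length) state with three declarative passes: build a lengths table, take max(), then first-occurrence index(); max+index preserves A's first-occurrence tie semantics and the all-empty-returns-0 behaviour.
import Mathlib
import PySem

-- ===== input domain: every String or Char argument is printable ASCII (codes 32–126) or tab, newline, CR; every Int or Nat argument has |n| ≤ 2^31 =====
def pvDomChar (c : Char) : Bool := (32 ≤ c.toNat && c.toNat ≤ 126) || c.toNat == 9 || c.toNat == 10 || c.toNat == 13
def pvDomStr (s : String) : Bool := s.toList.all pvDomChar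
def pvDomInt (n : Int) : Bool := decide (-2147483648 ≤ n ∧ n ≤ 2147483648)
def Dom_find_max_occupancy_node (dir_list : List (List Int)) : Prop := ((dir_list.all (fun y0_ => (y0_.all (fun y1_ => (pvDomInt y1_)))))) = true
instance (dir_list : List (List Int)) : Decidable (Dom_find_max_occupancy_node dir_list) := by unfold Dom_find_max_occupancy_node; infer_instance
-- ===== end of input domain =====

-- B rewrites A's fused stateful scan as three declarative passes (lengths table, max(), first-occurrence index()); same cost, more idiomatic.

-- ===== PORT A =====
-- A's loop body, over state (count, number, length)
def fmonStep (s : Int × Int × Int) (dirs : List Int) : Int × Int × Int :=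
  if s.2.2 < (dirs.length : Int) then (s.1 + 1, s.1, (dirs.length : Int))
  else (s.1 + 1, s.2.1, s.2.2)

def find_max_occupancy_node (dir_list : List (List Int)) : Int :=
  (dir_list.foldl fmonStep (0, 0, 0)).2.1

-- ===== PORT B =====
def find_max_occupancy_node_alt (dir_list : List (List Int)) : Int :=
  let lengths : List Int := dir_list.map (fun d => (d.length : Int))
  match PySem.List.max? lengths (fun x => x) with
  | none => 0                                  -- 'if not lengths: return 0'
  | some m =>
    match PySem.List.index? lengths m with     -- lengths.index(max(lengths))
    | some i => (i : Int)
    | none => 0                                -- unreachable: the max is a member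

-- ===== PRECONDITION & SPEC =====
def Spec_find_max_occupancy_node (dir_list : List (List Int)) (out : Int) : Prop := out = find_max_occupancy_node_alt dir_list
instance (dir_list : List (List Int)) (out : Int) : Decidable (Spec_find_max_occupancy_node dir_list out) := by unfold Spec_find_max_occupancy_node; infer_instance

-- ===== CLAIM (what is proved, stated in full; the proofs are below) =====
def Claim_equal_find_max_occupancy_node : Prop := ∀ (dir_list : List (List Int)), Dom_find_max_occupancy_node dir_list → Spec_find_max_occupancy_node dir_list (find_max_occupancy_node dir_list)

-- ===== LEMMAS AND PROOFS =====

-- relative index of A's final 'number' (if any update fires), for threshold l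
def fmonArg : List Int → Int → Option Nat
  | [], _ => none
  | x :: xs, l =>
    if l < x then some (match fmonArg xs x with | none => 0 | some j => j + 1)
    else (fmonArg xs l).map (· + 1)

theorem fmon_loop_char (ds : List (List Int)) : ∀ (c n l : Int),
    (ds.foldl fmonStep (c, n, l)).2.1 =
      match fmonArg (ds.map (fun d => (d.length : Int))) l with
      | none => n
      | some j => c + (j : Int) := by
  induction ds with
  | nil => intro c n l; simp [fmonArg]
  | cons d ds ih =>
    intro c n l
    rw [List.foldl_cons, List.map_cons]
    by_cases h : l < (d.length : Int)
    · rw [show fmonStep (c, n, l) d = (c + 1, c, (d.length : Int)) from by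
        simp [fmonStep, h]]
      rw [ih]
      rw [show fmonArg ((d.length : Int) :: ds.map (fun d => (d.length : Int))) l
            = some (match fmonArg (ds.map (fun d => (d.length : Int))) (d.length : Int) with
                    | none => 0 | some j => j + 1) from by
        rw [fmonArg, if_pos h]]
      cases hA : fmonArg (ds.map (fun d => (d.length : Int))) (d.length : Int) with
      | none => simp
      | some j =>
        show c + 1 + (j : Int) = c + ((j + 1 : Nat) : Int)
        push_cast
        ring
    · rw [show fmonStep (c, n, l) d = (c + 1, n, l) from by
        simp [fmonStep, h]]
      rw [ih]
      rw [show fmonArg ((d.length : Int) :: ds.map (fun d => (d.length : Int))) l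
            = (fmonArg (ds.map (fun d => (d.length : Int))) l).map (· + 1) from by
        rw [fmonArg, if_neg h]]
      cases hA : fmonArg (ds.map (fun d => (d.length : Int))) l with
      | none => simp
      | some j =>
        simp only [Option.map_some]
        show c + 1 + (j : Int) = c + ((j + 1 : Nat) : Int)
        push_cast
        ring

theorem fmonArg_none_iff (xs : List Int) : ∀ l, fmonArg xs l = none ↔ ∀ x ∈ xs, x ≤ l := by
  induction xs with
  | nil => intro l; simp [fmonArg]
  | cons x xs ih =>
    intro l
    simp only [fmonArg]
    by_cases h : l < x
    · simp [if_pos h]; intro hx; omega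
    · simp [if_neg h, ih]; intro _; omega

theorem foldl_max_of_all_le (xs : List Int) : ∀ l, (∀ x ∈ xs, x ≤ l) → xs.foldl max l = l := by
  induction xs with
  | nil => intro l _; rfl
  | cons x xs ih =>
    intro l h
    simp only [List.foldl_cons]
    have hx : x ≤ l := h x (by simp)
    have : max l x = l := by omega
    rw [this]
    exact ih l (fun y hy => h y (by simp [hy]))

theorem le_foldl_max_self (xs : List Int) : ∀ l, l ≤ xs.foldl max l := by
  induction xs with
  | nil => intro l; simp
  | cons x xs ih =>
    intro l
    simp only [List.foldl_cons]
    have := ih (max l x)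
    omega

theorem mem_le_foldl_max (xs : List Int) : ∀ l, ∀ y ∈ xs, y ≤ xs.foldl max l := by
  induction xs with
  | nil => intro l y hy; simp at hy
  | cons x xs ih =>
    intro l y hy
    simp only [List.foldl_cons]
    rcases List.mem_cons.mp hy with h | h
    · subst h
      have := le_foldl_max_self xs (max l y)
      omega
    · exact ih (max l x) y h

-- if an update fires, A's number is the FIRST index of the running max (seeded l)
theorem fmonArg_index (xs : List Int) : ∀ (l : Int) (j : Nat),
    fmonArg xs l = some j → PySem.List.index? xs (xs.foldl max l) = some j := by
  induction xs with
  | nil => intro l j h; simp [fmonArg] at h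
  | cons x xs ih =>
    intro l j h
    simp only [fmonArg] at h
    simp only [List.foldl_cons]
    by_cases hl : l < x
    · rw [if_pos hl] at h
      have hmax : max l x = x := by omega
      rw [hmax]
      cases hA : fmonArg xs x with
      | none =>
        -- all of xs ≤ x, so foldl max x xs = x, first index is 0
        rw [hA] at h
        have hle := (fmonArg_none_iff xs x).mp hA
        rw [foldl_max_of_all_le xs x hle]
        simp at h
        subst h
        exact PySem.List.index?_cons_self _ _
      | some j' =>
        rw [hA] at h
        simp at h
        have hidx := ih x j' hA
        -- x < some element of xs, so x ≠ foldl max x xs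
        have hne : ∃ y ∈ xs, x < y := by
          by_contra hc
          push_neg at hc
          rw [(fmonArg_none_iff xs x).mpr hc] at hA
          simp at hA
        obtain ⟨y, hy, hxy⟩ := hne
        have hym := mem_le_foldl_max xs x y hy
        have hxne : x ≠ xs.foldl max x := by omega
        rw [PySem.List.index?_cons_of_ne xs hxne, hidx, ← h]
        rfl
    · rw [if_neg hl] at h
      have hmax : max l x = l := by omega
      rw [hmax]
      cases hA : fmonArg xs l with
      | none => rw [hA] at h; simp at h
      | some j' =>
        rw [hA] at h
        simp at h
        have hidx := ih l j' hA
        have hne : ∃ y ∈ xs, l < y := by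
          by_contra hc
          push_neg at hc
          rw [(fmonArg_none_iff xs l).mpr hc] at hA
          simp at hA
        obtain ⟨y, hy, hly⟩ := hne
        have hym := mem_le_foldl_max xs l y hy
        have hxne : x ≠ xs.foldl max l := by omega
        rw [PySem.List.index?_cons_of_ne xs hxne, hidx, ← h]
        rfl

-- ===== VERDICT (by name: the statement is the Claim_ definition above) =====
theorem find_max_occupancy_node_spec : Claim_equal_find_max_occupancy_node := by
  intro dir_list _
  unfold Spec_find_max_occupancy_node find_max_occupancy_node find_max_occupancy_node_alt
  rw [fmon_loop_char dir_list 0 0 0]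
  cases dir_list with
  | nil => simp [PySem.List.max?, fmonArg]
  | cons d ds =>
    simp only [List.map_cons]
    rw [PySem.List.max?_id_cons]
    have hd0 : (0 : Int) ≤ (d.length : Int) := Int.natCast_nonneg _
    cases hA : fmonArg ((d.length : Int) :: ds.map (fun d => (d.length : Int))) 0 with
    | none =>
      -- every length ≤ 0, hence all lengths are 0; the max is 0 and its first index is 0
      have hle := (fmonArg_none_iff _ 0).mp hA
      have hd : (d.length : Int) = 0 := le_antisymm (hle _ (by simp)) hd0
      have hmax : (ds.map (fun d => (d.length : Int))).foldl max (d.length : Int) = (d.length : Int) :=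
        foldl_max_of_all_le _ _ (fun y hy => (hle y (by simp [hy])).trans (by omega))
      rw [hmax, hd]
      have hself := PySem.List.index?_cons_self (0 : Int) (ds.map (fun d => (d.length : Int)))
      simp only [PySem.List.index?_eq_idxOf?] at hself
      simp [hself]
    | some j =>
      have hidx := fmonArg_index ((d.length : Int) :: ds.map (fun d => (d.length : Int))) 0 j hA
      simp only [List.foldl_cons] at hidx
      have hmax0 : max (0 : Int) (d.length : Int) = (d.length : Int) := by omega
      rw [hmax0] at hidx
      simp only [PySem.List.index?_eq_idxOf?] at hidx
      simp [hidx]
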